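-- pv_equiv track=rewrite | github.com/pypi-data/pypi-mirror-392 | packages/konduktor-nightly/konduktor_nightly-0.1.0.dev20251118012558-py3-none-any.whl/konduktor/auth/service.py | _merge_named_sections
-- ===== SOURCE A (Python) =====
-- import copy
-- from typing import Any, Dict, List, Optional, Sequence
--
-- def _merge_named_sections(
--     existing: Sequence[Dict[str, Any]],
--     incoming: Sequence[Dict[str, Any]],
-- ) -> List[Dict[str, Any]]:
--     merged: List[Dict[str, Any]] = [copy.deepcopy(entry) for entry in existing]
--     index: Dict[str, int] = {}
--     for idx, entry in enumerate(merged):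
--         name = entry.get('name')
--         if isinstance(name, str):
--             index[name] = idx
--
--     for entry in incoming:
--         name = entry.get('name')
--         if not isinstance(name, str):
--             continue
--         data = copy.deepcopy(entry)
--         if name in index:
--             merged[index[name]] = data
--         else:
--             index[name] = len(merged)
--             merged.append(data)
--     return merged
-- ===== SOURCE B (Python) =====
-- import copy
--
-- def _merge_named_sections(existing, incoming):
--     overrides = {}
--     for entry in incoming:
--         name = entry.get('name')
--         if isinstance(name, str):
--             overrides[name] = copy.deepcopy(entry)
--     existing_names = {
--         entry.get('name') for entry in existing
--         if isinstance(entry.get('name'), str)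
--     }
--     merged = [
--         overrides[entry['name']]
--         if isinstance(entry.get('name'), str) and entry['name'] in overrides
--         else copy.deepcopy(entry)
--         for entry in existing
--     ]
--     merged.extend(
--         data for name, data in overrides.items() if name not in existing_names
--     )
--     return merged
-- ===== Notes on version B (the rewrite author's own statement) =====
-- stated objective: alternative
-- what changed: Replaces A's stateful in-place merge (a live name->index dict driving list mutation and appends) by a functional construction: a last-wins override dict, a set of existing names, one comprehension mapping existing through the overrides, and a final extend with never-seen overrides; Pre_ excludes existing lists where an overridden name occurs more than once, a duplicate-key corner where A replaces only the last occurrence and B every occurrence, either being defensible.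
import Mathlib
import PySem

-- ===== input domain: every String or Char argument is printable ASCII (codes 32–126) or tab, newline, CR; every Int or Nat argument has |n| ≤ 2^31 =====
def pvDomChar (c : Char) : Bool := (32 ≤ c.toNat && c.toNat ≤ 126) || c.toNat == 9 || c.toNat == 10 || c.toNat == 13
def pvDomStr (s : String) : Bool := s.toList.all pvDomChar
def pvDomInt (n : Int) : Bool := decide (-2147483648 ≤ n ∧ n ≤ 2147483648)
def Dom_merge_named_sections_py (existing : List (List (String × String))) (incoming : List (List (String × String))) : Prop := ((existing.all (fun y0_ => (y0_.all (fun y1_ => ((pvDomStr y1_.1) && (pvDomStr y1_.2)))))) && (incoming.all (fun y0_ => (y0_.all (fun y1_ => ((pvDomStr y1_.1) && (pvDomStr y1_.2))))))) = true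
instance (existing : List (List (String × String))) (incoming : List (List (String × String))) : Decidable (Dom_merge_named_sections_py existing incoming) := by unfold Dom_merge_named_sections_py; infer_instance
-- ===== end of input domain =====

-- B rebuilds the merge functionally (override dict + name set + one mapping pass) instead of
-- A's in-place mutation driven by a live name→index dict; equal cost, objective: alternative.

-- ===== PORT A =====
-- entry.get('name') on a dict-as-association-list: first match (dicts have unique keys).
-- `merged[index[name]] = data`: the stored index comes from enumerate/len so it is ≥ 0 and
-- in range; `.toNat` + List.set is exact there.
def merge_named_sections_py (existing : List (List (String × String))) (incoming : List (List (String × String))) : List (List (String × String)) :=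
  let merged := existing
  let index : PySem.Dict String Int :=
    (PySem.List.enumerate merged).foldl
      (fun d p =>
        match p.2.lookup "name" with
        | some name => d.insert name p.1
        | none => d)
      PySem.Dict.empty
  let final :=
    incoming.foldl
      (fun (st : List (List (String × String)) × PySem.Dict String Int) entry =>
        match entry.lookup "name" with
        | none => st
        | some name =>
          match st.2.get? name with
          | some i => (st.1.set i.toNat entry, st.2)
          | none => (st.1 ++ [entry], st.2.insert name (st.1.length : Int)))
      (merged, index)
  final.1

-- ===== PORT B =====
def merge_named_sections_py_alt (existing : List (List (String × String))) (incoming : List (List (String × String))) : List (List (String × String)) :=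
  let overrides : PySem.Dict String (List (String × String)) :=
    incoming.foldl
      (fun d entry =>
        match entry.lookup "name" with
        | some name => d.insert name entry
        | none => d)
      PySem.Dict.empty
  let existing_names : PySem.Set String :=
    PySem.Set.ofList (existing.filterMap (fun entry => entry.lookup "name"))
  let merged :=
    existing.map (fun entry =>
      match entry.lookup "name" with
      | some name =>
        match overrides.get? name with
        | some data => data
        | none => entry
      | none => entry)
  merged ++ overrides.items.filterMap (fun q =>
    if PySem.Set.contains existing_names q.1 then none else some q.2)

-- ===== PRECONDITION & SPEC =====
-- Pre_ excludes inputs where a name overridden by `incoming` occurs MORE THAN ONCE in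
-- `existing`: on such duplicate names A substitutes only at the last occurrence while B
-- substitutes at every occurrence — a first-vs-last corner on duplicate keys where either
-- value is defensible and neither is specified; A still returns a value there.
def Pre_merge_named_sections_py (existing : List (List (String × String))) (incoming : List (List (String × String))) : Prop :=
  ∀ n ∈ incoming.filterMap (fun entry => entry.lookup "name"),
    (existing.filterMap (fun entry => entry.lookup "name")).count n ≤ 1
instance (existing : List (List (String × String))) (incoming : List (List (String × String))) : Decidable (Pre_merge_named_sections_py existing incoming) := by unfold Pre_merge_named_sections_py; infer_instance

def pvWitness_merge_named_sections_py : (List (List (String × String))) × (List (List (String × String))) :=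
  ([[("name", "a"), ("v", "1")], [("name", "b")]], [[("name", "a"), ("v", "2")], [("name", "c")]])

def Spec_merge_named_sections_py (existing : List (List (String × String))) (incoming : List (List (String × String))) (out : List (List (String × String))) : Prop := out = merge_named_sections_py_alt existing incoming
instance (existing : List (List (String × String))) (incoming : List (List (String × String))) (out : List (List (String × String))) : Decidable (Spec_merge_named_sections_py existing incoming out) := by unfold Spec_merge_named_sections_py; infer_instance

-- ===== CLAIM (what is proved, stated in full; the proofs are below) =====
def Claim_equal_merge_named_sections_py : Prop := ∀ (existing : List (List (String × String))) (incoming : List (List (String × String))), Dom_merge_named_sections_py existing incoming → Pre_merge_named_sections_py existing incoming → Spec_merge_named_sections_py existing incoming (merge_named_sections_py existing incoming)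

-- ===== LEMMAS AND PROOFS =====

-- Proof-layer abbreviations and characterisations (used only by the proofs below).

abbrev PvEntry := List (String × String)

-- The 'name' values of a list of entries, in order.
def pvNames (l : List PvEntry) : List String := l.filterMap (fun e => e.lookup "name")

-- A's incoming loop body, as a named step function.
def pvStepA (st : List PvEntry × PySem.Dict String Int) (entry : PvEntry) : List PvEntry × PySem.Dict String Int :=
  match entry.lookup "name" with
  | none => st
  | some name =>
    match st.2.get? name with
    | some i => (st.1.set i.toNat entry, st.2)
    | none => (st.1 ++ [entry], st.2.insert name (st.1.length : Int))

-- The override-dict fold (B's phase 1, started from an arbitrary dict).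
def pvOvfold (d : PySem.Dict String PvEntry) (l : List PvEntry) : PySem.Dict String PvEntry :=
  l.foldl (fun d entry => match entry.lookup "name" with | some name => d.insert name entry | none => d) d

-- The enumerate-driven index fold (A's index dict), in recursive form.
def pvMkIx (l : List PvEntry) (s : Int) (d : PySem.Dict String Int) : PySem.Dict String Int :=
  match l with
  | [] => d
  | e :: t => pvMkIx t (s + 1) (match e.lookup "name" with | some n => d.insert n s | none => d)

-- An intermediate per-entry transformation (replace when the index matches) and its indexed map.
def pvTweak (ix : PySem.Dict String Int) (ov : PySem.Dict String PvEntry) (e : PvEntry) (i : Int) : PvEntry :=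
  match e.lookup "name" with
  | some n =>
    match ov.get? n with
    | some data => if ix.get? n = some i then data else e
    | none => e
  | none => e

def pvMapFix (ix : PySem.Dict String Int) (ov : PySem.Dict String PvEntry) : List PvEntry → Int → List PvEntry
  | [], _ => []
  | e :: t, i => pvTweak ix ov e i :: pvMapFix ix ov t (i + 1)

def pvExtras (ix : PySem.Dict String Int) (ov : PySem.Dict String PvEntry) : List PvEntry :=
  ov.items.filterMap (fun q => if ix.contains q.1 then none else some q.2)

def pvFinalize (m : List PvEntry) (ix : PySem.Dict String Int) (ov : PySem.Dict String PvEntry) : List PvEntry :=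
  pvMapFix ix ov m 0 ++ pvExtras ix ov

-- The loop invariant linking A's live state to the precomputed view.
def pvINV (m : List PvEntry) (ix : PySem.Dict String Int) : Prop :=
  (∀ n i, ix.get? n = some i → 0 ≤ i ∧ ∃ e, m[i.toNat]? = some e ∧ e.lookup "name" = some n) ∧
  (∀ e ∈ m, ∀ n, e.lookup "name" = some n → ix.contains n = true) ∧
  ix.keys.Nodup

-- Bridges between the ports and the proof-layer forms -------------------------

theorem pvEnumFold_eq_mkIx (l : List PvEntry) (s : Int) (d : PySem.Dict String Int) :
    (PySem.List.enumerate l s).foldl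
      (fun d p => match p.2.lookup "name" with | some name => d.insert name p.1 | none => d) d
    = pvMkIx l s d := by
  induction l generalizing s d with
  | nil => simp [PySem.List.enumerate_nil, pvMkIx]
  | cons e t ih =>
    rw [PySem.List.enumerate_cons, List.foldl_cons, pvMkIx]
    exact ih (s + 1) _

theorem pvA_eq (existing incoming : List PvEntry) :
    merge_named_sections_py existing incoming
    = (incoming.foldl pvStepA (existing, pvMkIx existing 0 PySem.Dict.empty)).1 := by
  simp only [merge_named_sections_py]
  rw [pvEnumFold_eq_mkIx]
  rfl

-- Facts about pvMkIx ----------------------------------------------------------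

theorem pvMkIx_not_mem (l : List PvEntry) (s : Int) (d : PySem.Dict String Int) (n : String)
    (h : n ∉ pvNames l) : (pvMkIx l s d).get? n = d.get? n := by
  induction l generalizing s d with
  | nil => rfl
  | cons e t ih =>
    rw [pvMkIx]
    cases hn : e.lookup "name" with
    | none =>
      exact ih (s + 1) d (by simpa [pvNames, List.filterMap_cons, hn] using h)
    | some k =>
      simp only [pvNames, List.filterMap_cons, hn, List.mem_cons] at h
      push_neg at h
      rw [ih (s + 1) _ h.2]
      exact PySem.Dict.get?_insert_of_ne _ _ h.1

theorem pvMkIx_unique (l : List PvEntry) (s : Int) (d : PySem.Dict String Int) (n : String)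
    (j : Nat) (hj : j < l.length) (hn : (l[j]'hj).lookup "name" = some n)
    (hc : (pvNames l).count n = 1) :
    (pvMkIx l s d).get? n = some (s + j) := by
  induction l generalizing s d j with
  | nil => exact absurd hj (by simp)
  | cons e t ih =>
    cases j with
    | zero =>
      simp only [List.getElem_cons_zero] at hn
      have hcc : (pvNames (e :: t)) = n :: pvNames t := by
        simp [pvNames, hn]
      rw [hcc, List.count_cons_self] at hc
      have hnot : n ∉ pvNames t := by
        intro hm
        have := List.count_pos_iff.2 hm
        omega
      rw [pvMkIx, hn, pvMkIx_not_mem t (s + 1) _ n hnot, PySem.Dict.get?_insert_self]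
      norm_num
    | succ j' =>
      have hj' : j' < t.length := by simpa using hj
      have hnt : (t[j']'hj').lookup "name" = some n := by simpa using hn
      have hmem : n ∈ pvNames t := List.mem_filterMap.2 ⟨t[j']'hj', by simp, hnt⟩
      have hpos : 0 < (pvNames t).count n := List.count_pos_iff.2 hmem
      rw [pvMkIx]
      cases hne : e.lookup "name" with
      | none =>
        have hct : (pvNames t).count n = 1 := by
          rwa [pvNames, List.filterMap_cons, hne] at hc
        rw [ih (s + 1) d j' hj' hnt hct]
        congr 1
        push_cast
        ring
      | some k =>
        have hcc : (pvNames (e :: t)) = k :: pvNames t := by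
          simp [pvNames, hne]
        have hkn : ¬ (n = k) := by
          intro hEq
          subst hEq
          rw [hcc, List.count_cons_self] at hc
          omega
        have hct : (pvNames t).count n = 1 := by
          rw [hcc, List.count_cons_of_ne (Ne.symm hkn)] at hc
          exact hc
        rw [ih (s + 1) _ j' hj' hnt hct]
        congr 1
        push_cast
        ring

theorem pvMkIx_contains (l : List PvEntry) (s : Int) (d : PySem.Dict String Int) (n : String) :
    (pvMkIx l s d).contains n = true ↔ (d.contains n = true ∨ n ∈ pvNames l) := by
  induction l generalizing s d with
  | nil => simp [pvMkIx, pvNames]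
  | cons e t ih =>
    rw [pvMkIx]
    cases hn : e.lookup "name" with
    | none =>
      rw [ih (s + 1) d]
      simp [pvNames, List.filterMap_cons, hn]
    | some k =>
      rw [ih (s + 1) _]
      rw [PySem.Dict.contains_insert]
      simp only [pvNames, List.filterMap_cons, hn, List.mem_cons, Bool.or_eq_true, beq_iff_eq]
      tauto

-- Facts about pvOvfold --------------------------------------------------------

theorem pvOvfold_cons (d : PySem.Dict String PvEntry) (e : PvEntry) (l : List PvEntry) :
    pvOvfold d (e :: l)
    = pvOvfold (match e.lookup "name" with | some n => d.insert n e | none => d) l := by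
  rfl

theorem pvGet_ovfold (l : List PvEntry) (d : PySem.Dict String PvEntry) (k : String) :
    (pvOvfold d l).get? k = ((pvOvfold PySem.Dict.empty l).get? k).or (d.get? k) := by
  induction l generalizing d with
  | nil => simp [pvOvfold, PySem.Dict.get?_empty]
  | cons e t ih =>
    rw [pvOvfold_cons, pvOvfold_cons]
    cases hn : e.lookup "name" with
    | none => exact ih d
    | some j =>
      rw [ih (d.insert j e), ih (PySem.Dict.empty.insert j e)]
      by_cases hk : k = j
      · subst hk
        rw [PySem.Dict.get?_insert_self, PySem.Dict.get?_insert_self]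
        cases (pvOvfold PySem.Dict.empty t).get? k <;> simp
      · rw [PySem.Dict.get?_insert_of_ne _ _ hk, PySem.Dict.get?_insert_of_ne _ _ hk,
          PySem.Dict.get?_empty]
        cases (pvOvfold PySem.Dict.empty t).get? k <;> simp

theorem pvOvfold_mem_names (l : List PvEntry) (n : String) (v : PvEntry)
    (h : (pvOvfold PySem.Dict.empty l).get? n = some v) : n ∈ pvNames l := by
  induction l generalizing v with
  | nil => simp [pvOvfold, PySem.Dict.get?_empty] at h
  | cons e t ih =>
    rw [pvOvfold_cons] at h
    cases hn : e.lookup "name" with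
    | none =>
      rw [hn] at h
      simp only [pvNames, List.filterMap_cons, hn]
      exact ih v h
    | some k =>
      rw [hn, pvGet_ovfold] at h
      simp only [pvNames, List.filterMap_cons, hn, List.mem_cons]
      cases hg : (pvOvfold PySem.Dict.empty t).get? n with
      | some w =>
        exact Or.inr (ih w hg)
      | none =>
        rw [hg, Option.none_or] at h
        by_cases hk : n = k
        · exact Or.inl hk
        · rw [PySem.Dict.get?_insert_of_ne _ _ hk, PySem.Dict.get?_empty] at h
          cases h

theorem pvNodup_ovfold (l : List PvEntry) (d : PySem.Dict String PvEntry)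
    (h : d.keys.Nodup) : (pvOvfold d l).keys.Nodup := by
  induction l generalizing d with
  | nil => exact h
  | cons e t ih =>
    rw [pvOvfold_cons]
    cases hn : e.lookup "name" with
    | none => exact ih d h
    | some j => exact ih _ (PySem.Dict.nodup_keys_insert _ _ _ h)

theorem pvFilter_map_overwrite {ν : Type} (Q : String → Bool) (k : String) (v : ν)
    (hk : Q k = true) (xs : List (String × ν)) :
    (xs.map (fun p => if (p.1 == k) = true then (k, v) else p)).filter (fun q => Q q.1)
    = (xs.filter (fun q => Q q.1)).map (fun p => if (p.1 == k) = true then (k, v) else p) := by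
  simp only [beq_iff_eq]
  induction xs with
  | nil => rfl
  | cons p t ih =>
    simp only [List.map_cons, List.filter_cons]
    by_cases hpk : p.1 = k
    · simp [hpk, hk, ih]
    · by_cases hq : Q p.1 = true <;> simp [hpk, hq, ih]

theorem pvFilter_map_overwrite_drop {ν : Type} (Q : String → Bool) (k : String) (v : ν)
    (hk : Q k = false) (xs : List (String × ν)) :
    (xs.map (fun p => if (p.1 == k) = true then (k, v) else p)).filter (fun q => Q q.1)
    = xs.filter (fun q => Q q.1) := by
  simp only [beq_iff_eq]
  induction xs with
  | nil => rfl
  | cons p t ih =>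
    simp only [List.map_cons, List.filter_cons]
    by_cases hpk : p.1 = k
    · simp [hpk, hk, ih]
    · by_cases hq : Q p.1 = true <;> simp [hpk, hq, ih]

theorem pvItems_insert_filter {ν : Type} (Q : String → Bool) (d : PySem.Dict String ν)
    (k : String) (v : ν) (hk : Q k = false) :
    (d.insert k v).items.filter (fun q => Q q.1) = d.items.filter (fun q => Q q.1) := by
  rw [PySem.Dict.items_insert]
  by_cases hc : d.contains k = true
  · simp only [hc, if_true]
    exact pvFilter_map_overwrite_drop Q k v hk d.items
  · simp only [hc]
    simp [List.filter_append, hk]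

theorem pvContains_of_filter (Q : String → Bool) {ν : Type} (d : PySem.Dict String ν)
    (k : String) (hk : Q k = true) :
    d.contains k = (d.items.filter (fun q => Q q.1)).any (fun q => q.1 == k) := by
  rw [PySem.Dict.contains_eq_decide_mem_keys]
  have hkeys : k ∈ d.keys ↔ ∃ p ∈ d.items, p.1 = k := by
    constructor
    · intro hm
      have : d.keys = d.items.map (fun p => p.1) := rfl
      rw [this] at hm
      obtain ⟨p, hp, he⟩ := List.mem_map.1 hm
      exact ⟨p, hp, he⟩
    · rintro ⟨p, hp, he⟩
      have := PySem.Dict.mem_keys_of_mem_items d hp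
      rwa [he] at this
  by_cases hm : k ∈ d.keys
  · obtain ⟨p, hp, he⟩ := hkeys.1 hm
    have : p ∈ d.items.filter (fun q => Q q.1) := by
      rw [List.mem_filter]
      exact ⟨hp, by rw [he]; exact hk⟩
    simp only [hm, decide_true]
    symm
    rw [List.any_eq_true]
    exact ⟨p, this, by simp [he]⟩
  · simp only [hm, decide_false]
    symm
    rw [List.any_eq_false]
    intro p hp
    rw [List.mem_filter] at hp
    simp only [beq_iff_eq]
    intro he
    exact hm (hkeys.2 ⟨p, hp.1, he⟩)

theorem pvOvfold_items_filter_congr (Q : String → Bool) (l : List PvEntry)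
    (d₁ d₂ : PySem.Dict String PvEntry)
    (h : d₁.items.filter (fun q => Q q.1) = d₂.items.filter (fun q => Q q.1)) :
    (pvOvfold d₁ l).items.filter (fun q => Q q.1)
    = (pvOvfold d₂ l).items.filter (fun q => Q q.1) := by
  induction l generalizing d₁ d₂ with
  | nil => exact h
  | cons e t ih =>
    rw [pvOvfold_cons, pvOvfold_cons]
    cases hn : e.lookup "name" with
    | none => simp only; exact ih d₁ d₂ h
    | some k =>
      simp only
      by_cases hk : Q k = true
      · have hc : d₁.contains k = d₂.contains k := by
          rw [pvContains_of_filter Q d₁ k hk, pvContains_of_filter Q d₂ k hk, h]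
        apply ih
        by_cases hc1 : d₁.contains k = true
        · rw [PySem.Dict.items_insert_of_contains _ _ hc1,
            PySem.Dict.items_insert_of_contains _ _ (hc ▸ hc1),
            pvFilter_map_overwrite Q k e hk, pvFilter_map_overwrite Q k e hk, h]
        · have hc1' : d₁.contains k = false := by simp at hc1 ⊢; exact hc1
          rw [PySem.Dict.items_insert_of_not_contains _ _ hc1',
            PySem.Dict.items_insert_of_not_contains _ _ (hc ▸ hc1'),
            List.filter_append, List.filter_append, h]
      · have hk' : Q k = false := by simp at hk ⊢; exact hk
        apply ih
        rw [pvItems_insert_filter Q d₁ k e hk', pvItems_insert_filter Q d₂ k e hk', h]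

theorem pvOvfold_head (l : List PvEntry) (d : PySem.Dict String PvEntry) (n : String)
    (v : PvEntry) (t : List (String × PvEntry)) (h : d.items = (n, v) :: t) :
    ∃ v' t', (pvOvfold d l).items = (n, v') :: t' := by
  induction l generalizing d v t with
  | nil => exact ⟨v, t, h⟩
  | cons e r ih =>
    rw [pvOvfold_cons]
    cases hn : e.lookup "name" with
    | none => simp only; exact ih d v t h
    | some k =>
      simp only
      by_cases hc : d.contains k = true
      · have : (d.insert k e).items
            = List.map (fun p => if (p.1 == k) = true then (k, e) else p) d.items :=
          PySem.Dict.items_insert_of_contains _ _ hc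
        rw [h, List.map_cons] at this
        by_cases hnk : n = k
        · subst hnk
          simp only [beq_self_eq_true, if_true] at this
          exact ih _ _ _ this
        · have : (d.insert k e).items
              = (n, v) :: List.map (fun p => if (p.1 == k) = true then (k, e) else p) t := by
            rw [this]
            congr 1
            simp [hnk]
          exact ih _ _ _ this
      · have hc' : d.contains k = false := by simp at hc ⊢; exact hc
        have : (d.insert k e).items = (n, v) :: (t ++ [(k, e)]) := by
          rw [PySem.Dict.items_insert_of_not_contains _ _ hc', h]; rfl
        exact ih _ _ _ this

-- Facts about pvMapFix / pvExtras ---------------------------------------------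

theorem pvMapFix_length (ix : PySem.Dict String Int) (ov : PySem.Dict String PvEntry)
    (l : List PvEntry) (s : Int) : (pvMapFix ix ov l s).length = l.length := by
  induction l generalizing s with
  | nil => rfl
  | cons e t ih => simp [pvMapFix, ih]

theorem pvMapFix_getElem (ix : PySem.Dict String Int) (ov : PySem.Dict String PvEntry)
    (l : List PvEntry) (s : Int) (j : Nat) (hj : j < l.length) :
    (pvMapFix ix ov l s)[j]'(by rw [pvMapFix_length]; exact hj) = pvTweak ix ov l[j] (s + j) := by
  induction l generalizing s j with
  | nil => exact absurd hj (by simp)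
  | cons e t ih =>
    cases j with
    | zero => simp [pvMapFix]
    | succ j' =>
      have hj' : j' < t.length := by simpa using hj
      have := ih (s + 1) j' hj'
      simp only [pvMapFix, List.getElem_cons_succ]
      rw [this]
      congr 1
      push_cast
      omega

theorem pvMapFix_congr (ix₁ ix₂ : PySem.Dict String Int) (ov₁ ov₂ : PySem.Dict String PvEntry)
    (l : List PvEntry) (s : Int)
    (h : ∀ e ∈ l, ∀ n, e.lookup "name" = some n → ix₁.get? n = ix₂.get? n ∧ ov₁.get? n = ov₂.get? n) :
    pvMapFix ix₁ ov₁ l s = pvMapFix ix₂ ov₂ l s := by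
  induction l generalizing s with
  | nil => rfl
  | cons e t ih =>
    simp only [pvMapFix]
    refine congrArg₂ List.cons ?_ ?_
    case _ =>
      unfold pvTweak
      cases hn : e.lookup "name" with
      | none => rfl
      | some n =>
        obtain ⟨h1, h2⟩ := h e (by simp) n hn
        simp [h1, h2]
    case _ => exact ih (s + 1) (fun e' he' => h e' (by simp [he']))

theorem pvExtras_eq_filter (ix : PySem.Dict String Int) (ov : PySem.Dict String PvEntry) :
    pvExtras ix ov = (ov.items.filter (fun q => !ix.contains q.1)).map (fun q => q.2) := by
  unfold pvExtras
  induction ov.items with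
  | nil => rfl
  | cons q t ih =>
    by_cases hc : ix.contains q.1 = true <;>
      simp [hc, ih]

theorem pvMapFix_empty (ix : PySem.Dict String Int) (l : List PvEntry) (s : Int) :
    pvMapFix ix PySem.Dict.empty l s = l := by
  induction l generalizing s with
  | nil => rfl
  | cons e t ih =>
    simp only [pvMapFix, ih]
    unfold pvTweak
    cases hn : e.lookup "name" <;> simp [PySem.Dict.get?_empty]

theorem pvMapFix_append (ix : PySem.Dict String Int) (ov : PySem.Dict String PvEntry)
    (a b : List PvEntry) (s : Int) :
    pvMapFix ix ov (a ++ b) s = pvMapFix ix ov a s ++ pvMapFix ix ov b (s + a.length) := by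
  induction a generalizing s with
  | nil => simp [pvMapFix]
  | cons e t ih =>
    simp only [List.cons_append, pvMapFix, List.length_cons]
    rw [ih (s + 1)]
    congr 2
    push_cast
    ring_nf

theorem pvSet_step (m : List PvEntry) (ix : PySem.Dict String Int) (rest : List PvEntry)
    (e : PvEntry) (n : String) (i : Int)
    (hINV : pvINV m ix) (hn : e.lookup "name" = some n) (hg : ix.get? n = some i) :
    pvFinalize (m.set i.toNat e) ix (pvOvfold PySem.Dict.empty rest)
    = pvFinalize m ix (pvOvfold (PySem.Dict.empty.insert n e) rest) := by
  obtain ⟨h1, h2, h3⟩ := hINV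
  obtain ⟨hi0, em, hem, hnamem⟩ := h1 n i hg
  have hlen : i.toNat < m.length := (List.getElem?_eq_some_iff.1 hem).1
  have hmi : m[i.toNat]'hlen = em := (List.getElem?_eq_some_iff.1 hem).2
  have hcn : ix.contains n = true := by
    rw [PySem.Dict.contains_eq_isSome_get?, hg]; rfl
  have hov : ∀ k, k ≠ n →
      (pvOvfold (PySem.Dict.empty.insert n e) rest).get? k
      = (pvOvfold PySem.Dict.empty rest).get? k := by
    intro k hk
    rw [pvGet_ovfold rest (PySem.Dict.empty.insert n e),
      PySem.Dict.get?_insert_of_ne _ _ hk, PySem.Dict.get?_empty]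
    cases (pvOvfold PySem.Dict.empty rest).get? k <;> rfl
  have hovn : (pvOvfold (PySem.Dict.empty.insert n e) rest).get? n
      = ((pvOvfold PySem.Dict.empty rest).get? n).or (some e) := by
    rw [pvGet_ovfold rest _, PySem.Dict.get?_insert_self]
  unfold pvFinalize
  congr 1
  · apply List.ext_getElem
    · rw [pvMapFix_length, pvMapFix_length, List.length_set]
    · intro j hj1 hj2
      rw [pvMapFix_length, List.length_set] at hj1
      rw [pvMapFix_getElem ix _ _ 0 j (by rw [List.length_set]; exact hj1),
        pvMapFix_getElem ix _ _ 0 j hj1]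
      by_cases hji : j = i.toNat
      · subst hji
        have h0j : ((i.toNat : Nat) : Int) = i := by omega
        rw [List.getElem_set_self (by simpa using hlen), hmi]
        cases hw : (pvOvfold PySem.Dict.empty rest).get? n with
        | none => simp [pvTweak, hn, hnamem, hovn, hw, hg, h0j]
        | some w => simp [pvTweak, hn, hnamem, hovn, hw, hg, h0j]
      · rw [List.getElem_set_ne (by omega)]
        cases hname : (m[j]'hj1).lookup "name" with
        | none => simp [pvTweak, hname]
        | some n' =>
          by_cases hnn : n' = n
          · subst hnn
            have hine : i ≠ ((j : Nat) : Int) := by omega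
            cases hw : (pvOvfold PySem.Dict.empty rest).get? n' with
            | none => simp [pvTweak, hname, hovn, hw, hg, hine]
            | some w => simp [pvTweak, hname, hovn, hw, hg, hine]
          · simp only [pvTweak, hname, hov n' hnn]
  · rw [pvExtras_eq_filter, pvExtras_eq_filter]
    congr 1
    exact (pvOvfold_items_filter_congr (fun k => !ix.contains k) rest _ _
      (pvItems_insert_filter (fun k => !ix.contains k) PySem.Dict.empty n e (by beta_reduce; rw [hcn]; rfl))).symm

theorem pvApp_step (m : List PvEntry) (ix : PySem.Dict String Int) (rest : List PvEntry)
    (e : PvEntry) (n : String)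
    (hINV : pvINV m ix) (hn : e.lookup "name" = some n) (hg : ix.get? n = none) :
    pvFinalize (m ++ [e]) (ix.insert n (m.length : Int)) (pvOvfold PySem.Dict.empty rest)
    = pvFinalize m ix (pvOvfold (PySem.Dict.empty.insert n e) rest) := by
  obtain ⟨h1, h2, h3⟩ := hINV
  have hcn : ix.contains n = false := by
    rw [PySem.Dict.contains_eq_isSome_get?, hg]; rfl
  have hov : ∀ k, k ≠ n →
      (pvOvfold (PySem.Dict.empty.insert n e) rest).get? k
      = (pvOvfold PySem.Dict.empty rest).get? k := by
    intro k hk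
    rw [pvGet_ovfold rest (PySem.Dict.empty.insert n e),
      PySem.Dict.get?_insert_of_ne _ _ hk, PySem.Dict.get?_empty]
    cases (pvOvfold PySem.Dict.empty rest).get? k <;> rfl
  have hovn : (pvOvfold (PySem.Dict.empty.insert n e) rest).get? n
      = ((pvOvfold PySem.Dict.empty rest).get? n).or (some e) := by
    rw [pvGet_ovfold rest _, PySem.Dict.get?_insert_self]
  have hnoe : ∀ e' ∈ m, ∀ n', e'.lookup "name" = some n' → n' ≠ n := by
    intro e' he' n' hn' hEq
    subst hEq
    rw [h2 e' he' n' hn'] at hcn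
    cases hcn
  have hseed : (PySem.Dict.empty.insert n e).items = [(n, e)] := by
    rw [PySem.Dict.items_insert_of_not_contains _ _ (PySem.Dict.contains_empty n)]
    rfl
  obtain ⟨v', t', hitems⟩ := pvOvfold_head rest _ n e [] hseed
  have hnodup : (pvOvfold (PySem.Dict.empty.insert n e) rest).keys.Nodup :=
    pvNodup_ovfold rest _ (PySem.Dict.nodup_keys_insert _ _ _ PySem.Dict.nodup_keys_empty)
  have hv' : (pvOvfold (PySem.Dict.empty.insert n e) rest).get? n = some v' :=
    PySem.Dict.get?_of_mem_items _ (by rw [hitems]; exact List.mem_cons_self) hnodup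
  have hv'or : some v' = ((pvOvfold PySem.Dict.empty rest).get? n).or (some e) := by
    rw [← hovn, hv']
  have ht'n : ∀ q ∈ t', q.1 ≠ n := by
    have hk : (pvOvfold (PySem.Dict.empty.insert n e) rest).keys
        = n :: t'.map (fun p => p.1) := by
      show (pvOvfold (PySem.Dict.empty.insert n e) rest).items.map (fun p => p.1)
          = n :: t'.map (fun p => p.1)
      rw [hitems]
      rfl
    rw [hk] at hnodup
    intro q hq hEq
    exact (List.nodup_cons.1 hnodup).1 (hEq ▸ List.mem_map_of_mem hq)
  have hfilt : (pvOvfold (PySem.Dict.empty.insert n e) rest).items.filter (fun q => !(q.1 == n))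
      = (pvOvfold PySem.Dict.empty rest).items.filter (fun q => !(q.1 == n)) :=
    pvOvfold_items_filter_congr (fun k => !(k == n)) rest _ _
      (pvItems_insert_filter (fun k => !(k == n)) PySem.Dict.empty n e (by beta_reduce; simp))
  have ht' : t' = (pvOvfold PySem.Dict.empty rest).items.filter (fun q => !(q.1 == n)) := by
    rw [← hfilt, hitems, List.filter_cons_of_neg (by simp)]
    exact (List.filter_eq_self.2 (fun q hq => by simp [ht'n q hq])).symm
  unfold pvFinalize
  rw [pvMapFix_append, pvExtras_eq_filter, pvExtras_eq_filter, hitems]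
  have ha : pvMapFix (ix.insert n (m.length : Int)) (pvOvfold PySem.Dict.empty rest) m 0
      = pvMapFix ix (pvOvfold (PySem.Dict.empty.insert n e) rest) m 0 := by
    apply pvMapFix_congr
    intro e' he' n' hn'
    have hne : n' ≠ n := hnoe e' he' n' hn'
    exact ⟨PySem.Dict.get?_insert_of_ne _ _ hne, (hov n' hne).symm⟩
  have hb : pvMapFix (ix.insert n (m.length : Int)) (pvOvfold PySem.Dict.empty rest) [e]
      ((0 : Int) + (m.length : Int)) = [v'] := by
    show pvTweak (ix.insert n (m.length : Int)) (pvOvfold PySem.Dict.empty rest) e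
        ((0 : Int) + (m.length : Int)) :: [] = [v']
    cases hw : (pvOvfold PySem.Dict.empty rest).get? n with
    | none =>
      rw [hw] at hv'or
      simp [pvTweak, hn, hw, Option.some_inj.mp hv'or]
    | some w =>
      rw [hw] at hv'or
      simp [pvTweak, hn, hw, PySem.Dict.get?_insert_self, Option.some_inj.mp hv'or]
  have hc' : (List.filter (fun q => !(ix.insert n (m.length : Int)).contains q.1)
        (pvOvfold PySem.Dict.empty rest).items).map (fun q => q.2)
      = (t'.filter (fun q => !ix.contains q.1)).map (fun q => q.2) := by
    congr 1
    rw [ht', List.filter_filter]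
    apply List.filter_congr
    intro q hq
    rw [PySem.Dict.contains_insert]
    simp [Bool.not_or, Bool.and_comm]
  rw [ha, hb]
  rw [List.filter_cons_of_pos (by simp [hcn])]
  rw [List.map_cons]
  rw [hc']
  simp [List.append_assoc]

-- Invariant preservation ------------------------------------------------------

theorem pvINV_set (m : List PvEntry) (ix : PySem.Dict String Int) (e : PvEntry) (n : String)
    (i : Int) (hINV : pvINV m ix) (hn : e.lookup "name" = some n) (hg : ix.get? n = some i) :
    pvINV (m.set i.toNat e) ix := by
  obtain ⟨h1, h2, h3⟩ := hINV
  refine ⟨?_, ?_, h3⟩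
  · intro n' i' hg'
    obtain ⟨hi'0, e₀, he₀, hname₀⟩ := h1 n' i' hg'
    obtain ⟨hi0, e₁, he₁, hname₁⟩ := h1 n i hg
    have hlen : i.toNat < m.length := (List.getElem?_eq_some_iff.1 he₁).1
    by_cases hii : i.toNat = i'.toNat
    · have he01 : e₀ = e₁ := by
        rw [← hii] at he₀
        rw [he₀] at he₁
        exact Option.some_inj.mp he₁
      have hnn : n' = n := by
        rw [he01, hname₁] at hname₀
        exact (Option.some_inj.mp hname₀).symm
      refine ⟨hi'0, e, ?_, by rw [hnn]; exact hn⟩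
      rw [← hii]
      simp [hlen]
    · refine ⟨hi'0, e₀, ?_, hname₀⟩
      rw [List.getElem?_set]
      simp only [hii, if_false]
      exact he₀
  · intro e' he' n' hn'
    rcases List.mem_or_eq_of_mem_set he' with h | h
    · exact h2 e' h n' hn'
    · subst h
      have hnn : n' = n := by rw [hn'] at hn; exact Option.some_inj.mp hn
      rw [hnn, PySem.Dict.contains_eq_isSome_get?, hg]
      rfl

theorem pvINV_app (m : List PvEntry) (ix : PySem.Dict String Int) (e : PvEntry) (n : String)
    (hINV : pvINV m ix) (hn : e.lookup "name" = some n) (hg : ix.get? n = none) :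
    pvINV (m ++ [e]) (ix.insert n (m.length : Int)) := by
  obtain ⟨h1, h2, h3⟩ := hINV
  refine ⟨?_, ?_, PySem.Dict.nodup_keys_insert _ _ _ h3⟩
  · intro n' i' hg'
    by_cases hne : n' = n
    · subst hne
      rw [PySem.Dict.get?_insert_self] at hg'
      have hi' : i' = (m.length : Int) := (Option.some_inj.mp hg').symm
      subst hi'
      refine ⟨Int.natCast_nonneg _, e, ?_, hn⟩
      simp
    · rw [PySem.Dict.get?_insert_of_ne _ _ hne] at hg'
      obtain ⟨hi0, e₀, he₀, hname₀⟩ := h1 n' i' hg'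
      refine ⟨hi0, e₀, ?_, hname₀⟩
      rw [List.getElem?_append_left (List.getElem?_eq_some_iff.1 he₀).1]
      exact he₀
  · intro e' he' n' hn'
    rw [PySem.Dict.contains_insert]
    rcases List.mem_append.1 he' with h | h
    · rw [h2 e' h n' hn']
      simp
    · have : e' = e := by simpa using h
      subst this
      have : n' = n := by rw [hn'] at hn; exact Option.some_inj.mp hn
      simp [this]

theorem pvMkIx_inv (l pre : List PvEntry) (d : PySem.Dict String Int)
    (h1 : ∀ n i, d.get? n = some i → 0 ≤ i ∧ ∃ e, pre[i.toNat]? = some e ∧ e.lookup "name" = some n)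
    (h2 : ∀ e ∈ pre, ∀ n, e.lookup "name" = some n → d.contains n = true)
    (h3 : d.keys.Nodup) :
    pvINV (pre ++ l) (pvMkIx l (pre.length : Int) d) := by
  induction l generalizing pre d with
  | nil =>
    rw [pvMkIx, List.append_nil]
    exact ⟨h1, h2, h3⟩
  | cons e t ih =>
    rw [pvMkIx]
    have hlen : ((pre ++ [e]).length : Int) = (pre.length : Int) + 1 := by
      simp
    cases hn : e.lookup "name" with
    | none =>
      simp only
      have := ih (pre ++ [e]) d
        (by
          intro n' i' hg'
          obtain ⟨hi0, e₀, he₀, hname₀⟩ := h1 n' i' hg'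
          exact ⟨hi0, e₀, by
            rw [List.getElem?_append_left (List.getElem?_eq_some_iff.1 he₀).1]
            exact he₀, hname₀⟩)
        (by
          intro e' he' n' hn'
          rcases List.mem_append.1 he' with h | h
          · exact h2 e' h n' hn'
          · have : e' = e := by simpa using h
            rw [this, hn] at hn'
            exact absurd hn' (by simp))
        h3
      rw [hlen] at this
      rwa [List.append_assoc, List.singleton_append] at this
    | some k =>
      simp only
      have := ih (pre ++ [e]) (d.insert k (pre.length : Int))
        (by
          intro n' i' hg'
          by_cases hne : n' = k
          · subst hne
            rw [PySem.Dict.get?_insert_self] at hg'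
            have hi' : i' = (pre.length : Int) := (Option.some_inj.mp hg').symm
            subst hi'
            refine ⟨Int.natCast_nonneg _, e, by simp, hn⟩
          · rw [PySem.Dict.get?_insert_of_ne _ _ hne] at hg'
            obtain ⟨hi0, e₀, he₀, hname₀⟩ := h1 n' i' hg'
            exact ⟨hi0, e₀, by
              rw [List.getElem?_append_left (List.getElem?_eq_some_iff.1 he₀).1]
              exact he₀, hname₀⟩)
        (by
          intro e' he' n' hn'
          rw [PySem.Dict.contains_insert]
          rcases List.mem_append.1 he' with h | h
          · rw [h2 e' h n' hn']
            simp
          · have : e' = e := by simpa using h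
            rw [this, hn] at hn'
            have : n' = k := (Option.some_inj.mp hn').symm
            simp [this])
        (PySem.Dict.nodup_keys_insert _ _ _ h3)
      rw [hlen] at this
      rwa [List.append_assoc, List.singleton_append] at this

-- Main induction (A's fold equals the precomputed view) -----------------------

theorem pvMain (inc : List PvEntry) (m : List PvEntry) (ix : PySem.Dict String Int)
    (hINV : pvINV m ix) :
    (inc.foldl pvStepA (m, ix)).1 = pvFinalize m ix (pvOvfold PySem.Dict.empty inc) := by
  induction inc generalizing m ix with
  | nil =>
    show m = pvFinalize m ix (pvOvfold PySem.Dict.empty [])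
    unfold pvFinalize pvExtras
    rw [show pvOvfold PySem.Dict.empty [] = PySem.Dict.empty from rfl, pvMapFix_empty]
    simp [PySem.Dict.empty]
  | cons e rest ih =>
    rw [List.foldl_cons, pvOvfold_cons]
    cases hn : e.lookup "name" with
    | none =>
      have hstep : pvStepA (m, ix) e = (m, ix) := by simp [pvStepA, hn]
      rw [hstep]
      exact ih m ix hINV
    | some n =>
      cases hg : ix.get? n with
      | some i =>
        have hstep : pvStepA (m, ix) e = (m.set i.toNat e, ix) := by simp [pvStepA, hn, hg]
        rw [hstep, ih _ _ (pvINV_set m ix e n i hINV hn hg)]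
        exact pvSet_step m ix rest e n i hINV hn hg
      | none =>
        have hstep : pvStepA (m, ix) e = (m ++ [e], ix.insert n (m.length : Int)) := by
          simp [pvStepA, hn, hg]
        rw [hstep, ih _ _ (pvINV_app m ix e n hINV hn hg)]
        exact pvApp_step m ix rest e n hINV hn hg

-- B equals the precomputed view under Pre_ ------------------------------------

theorem pvAlt_eq (existing incoming : List PvEntry)
    (hpre : Pre_merge_named_sections_py existing incoming) :
    merge_named_sections_py_alt existing incoming
    = pvFinalize existing (pvMkIx existing 0 PySem.Dict.empty) (pvOvfold PySem.Dict.empty incoming) := by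
  have hfold : incoming.foldl
      (fun d entry => match entry.lookup "name" with | some name => d.insert name entry | none => d)
      (PySem.Dict.empty : PySem.Dict String PvEntry) = pvOvfold PySem.Dict.empty incoming := rfl
  simp only [merge_named_sections_py_alt, pvFinalize]
  rw [hfold]
  congr 1
  · -- the mapped pass equals pvMapFix
    apply List.ext_getElem
    · rw [List.length_map, pvMapFix_length]
    · intro j hj1 hj2
      rw [List.length_map] at hj1
      rw [List.getElem_map, pvMapFix_getElem _ _ _ 0 j hj1]
      cases hname : (existing[j]'hj1).lookup "name" with
      | none => simp [pvTweak, hname]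
      | some n =>
        cases hov : (pvOvfold PySem.Dict.empty incoming).get? n with
        | none => simp [pvTweak, hname, hov]
        | some data =>
          have hmemInc : n ∈ pvNames incoming := pvOvfold_mem_names incoming n data hov
          have hmemEx : n ∈ pvNames existing :=
            List.mem_filterMap.2 ⟨existing[j]'hj1, by simp, hname⟩
          have hcount : (pvNames existing).count n = 1 := by
            have hle := hpre n hmemInc
            have hpos : 0 < (pvNames existing).count n := List.count_pos_iff.2 hmemEx
            change (pvNames existing).count n ≤ 1 at hle
            omega
          have hix := pvMkIx_unique existing 0 PySem.Dict.empty n j hj1 hname hcount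
          simp [pvTweak, hname, hix, hov]
  · -- the extras pass equals pvExtras
    unfold pvExtras
    apply List.filterMap_congr
    intro q hq
    have hset : PySem.Set.contains
        (PySem.Set.ofList (existing.filterMap (fun entry => entry.lookup "name"))) q.1
        = (pvMkIx existing 0 PySem.Dict.empty).contains q.1 := by
      by_cases hm : q.1 ∈ pvNames existing
      · have h1 : PySem.Set.contains
            (PySem.Set.ofList (existing.filterMap (fun entry => entry.lookup "name"))) q.1 = true :=
          (PySem.Set.contains_iff _ _).2 ((PySem.Set.mem_ofList _ _).2 hm)
        have h2 : (pvMkIx existing 0 PySem.Dict.empty).contains q.1 = true :=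
          (pvMkIx_contains existing 0 PySem.Dict.empty q.1).2 (Or.inr hm)
        rw [h1, h2]
      · have h1 : PySem.Set.contains
            (PySem.Set.ofList (existing.filterMap (fun entry => entry.lookup "name"))) q.1 = false := by
          cases hc : PySem.Set.contains
              (PySem.Set.ofList (existing.filterMap (fun entry => entry.lookup "name"))) q.1
          · rfl
          · exact absurd ((PySem.Set.mem_ofList _ _).1 ((PySem.Set.contains_iff _ _).1 hc)) hm
        have h2 : (pvMkIx existing 0 PySem.Dict.empty).contains q.1 = false := by
          cases hc : (pvMkIx existing 0 PySem.Dict.empty).contains q.1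
          · rfl
          · rcases (pvMkIx_contains existing 0 PySem.Dict.empty q.1).1 hc with h | h
            · rw [PySem.Dict.contains_empty] at h; cases h
            · exact absurd h hm
        rw [h1, h2]
    rw [hset]

-- ===== VERDICT (by name: the statement is the Claim_ definition above) =====
theorem merge_named_sections_py_spec : Claim_equal_merge_named_sections_py := by
  intro existing incoming _ hpre
  show merge_named_sections_py existing incoming = merge_named_sections_py_alt existing incoming
  rw [pvA_eq, pvAlt_eq existing incoming hpre]
  exact pvMain incoming existing _ (by
    have h := pvMkIx_inv existing [] PySem.Dict.empty
      (by intro n i h; simp [PySem.Dict.get?_empty] at h)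
      (by intro e he; simp at he)
      PySem.Dict.nodup_keys_empty
    simpa using h)
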